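-- pv_equiv track=rewrite | github.com/mancristiana/advent-of-code-2020 | day1-report-repair/one.py | getReportNumber
-- ===== SOURCE A (Python) =====
-- def getReportNumber(numbers):
--     length = len(numbers)
--     for i in range(length):
--         for j in range(i + 1, length):
--             numberI = int(numbers[i])
--             numberJ = int(numbers[j])
--             if numberI + numberJ == 2020:
--                 return numberI * numberJ
-- ===== SOURCE B (Python) =====
-- def getReportNumber(numbers):
--     remaining = {}
--     for x in numbers:
--         remaining[x] = remaining.get(x, 0) + 1
--     for x in numbers:
--         remaining[x] = remaining.get(x, 0) - 1
--         if remaining.get(2020 - x, 0) > 0: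
--             return x * (2020 - x)
-- ===== Notes on version B (the rewrite author's own statement) =====
-- stated objective: faster
-- what changed: Replaced the O(n^2) nested index loops with one counting pass building a dict of multiplicities plus one scan that decrements the current element and checks the complement 2020-x among the remaining elements.
import Mathlib
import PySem

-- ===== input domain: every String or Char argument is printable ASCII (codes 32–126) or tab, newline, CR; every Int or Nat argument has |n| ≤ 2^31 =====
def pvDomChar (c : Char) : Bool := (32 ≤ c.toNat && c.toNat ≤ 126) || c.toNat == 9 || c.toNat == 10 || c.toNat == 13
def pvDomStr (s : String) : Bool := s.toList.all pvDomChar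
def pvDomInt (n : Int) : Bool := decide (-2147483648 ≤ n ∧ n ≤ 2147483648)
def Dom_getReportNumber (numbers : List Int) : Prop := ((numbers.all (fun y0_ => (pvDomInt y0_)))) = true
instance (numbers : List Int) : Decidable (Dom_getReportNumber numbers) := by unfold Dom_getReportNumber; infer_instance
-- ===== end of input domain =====

-- B replaces A's quadratic nested index loops by a one-pass multiplicity dict (objective: faster, asymptotic).

-- ===== PORT A =====
-- inner loop: for j in range(i+1, length): …
def pvLoopJ (numbers : List Int) (i j : Nat) : Option Int :=
  if _h : j < numbers.length then
    match PySem.List.pyGet? numbers (i : Int), PySem.List.pyGet? numbers (j : Int) with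
    | some numberI, some numberJ =>
        if numberI + numberJ = 2020 then some (numberI * numberJ)
        else pvLoopJ numbers i (j + 1)
    | _, _ => none
  else none
termination_by numbers.length - j

-- outer loop: for i in range(length): …
def pvLoopI (numbers : List Int) (i : Nat) : Option Int :=
  if _h : i < numbers.length then
    match pvLoopJ numbers i (i + 1) with
    | some r => some r
    | none => pvLoopI numbers (i + 1)
  else none
termination_by numbers.length - i

def getReportNumber (numbers : List Int) : Option Int :=
  pvLoopI numbers 0

-- ===== PORT B =====
-- second loop of Source B: decrement the current value's count, then look up the complement
def pvScan (remaining : PySem.Dict Int Int) : List Int → Option Int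
  | [] => none
  | x :: xs =>
      let remaining' := remaining.insert x (remaining.getD x 0 - 1)
      if remaining'.getD (2020 - x) 0 > 0 then some (x * (2020 - x))
      else pvScan remaining' xs

def getReportNumber_alt (numbers : List Int) : Option Int :=
  let remaining := numbers.foldl (fun d x => d.insert x (d.getD x 0 + 1)) PySem.Dict.empty
  pvScan remaining numbers

-- ===== PRECONDITION & SPEC =====
def Spec_getReportNumber (numbers : List Int) (out : Option Int) : Prop := out = getReportNumber_alt numbers
instance (numbers : List Int) (out : Option Int) : Decidable (Spec_getReportNumber numbers out) := by unfold Spec_getReportNumber; infer_instance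

-- ===== CLAIM (what is proved, stated in full; the proofs are below) =====
def Claim_equal_getReportNumber : Prop := ∀ (numbers : List Int), Dom_getReportNumber numbers → Spec_getReportNumber numbers (getReportNumber numbers)

-- ===== LEMMAS AND PROOFS =====

-- reference form: first element (in order) whose complement 2020-x occurs later; its product
def pvFirst : List Int → Option Int
  | [] => none
  | x :: xs => if (2020 - x) ∈ xs then some (x * (2020 - x)) else pvFirst xs

theorem pvLoopJ_eq (numbers : List Int) (i j : Nat) (hi : i < numbers.length) :
    pvLoopJ numbers i j =
      if (2020 - numbers[i]) ∈ numbers.drop j then some (numbers[i] * (2020 - numbers[i])) else none := by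
  by_cases hj : j < numbers.length
  · rw [pvLoopJ]
    simp only [hj, dif_pos]
    rw [PySem.List.pyGet?_natCast numbers i, PySem.List.pyGet?_natCast numbers j,
        List.getElem?_eq_getElem hi, List.getElem?_eq_getElem hj]
    dsimp only
    have hdrop : numbers.drop j = numbers[j] :: numbers.drop (j + 1) :=
      (List.getElem_cons_drop hj).symm
    by_cases hsum : numbers[i] + numbers[j] = 2020
    · have hv : (2020 : Int) - numbers[i] = numbers[j] := by omega
      rw [if_pos hsum, hdrop, if_pos (by rw [hv]; exact List.mem_cons_self ..), hv]
    · have hne : (2020 : Int) - numbers[i] ≠ numbers[j] := by omega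
      rw [if_neg hsum, pvLoopJ_eq numbers i (j + 1) hi]
      conv_rhs => rw [hdrop]
      simp only [List.mem_cons, hne, false_or]
  · have : numbers.drop j = [] := List.drop_eq_nil_of_le (by omega)
    rw [pvLoopJ]
    simp [hj, this]
termination_by numbers.length - j

theorem pvLoopI_eq (numbers : List Int) (i : Nat) :
    pvLoopI numbers i = pvFirst (numbers.drop i) := by
  by_cases hi : i < numbers.length
  · rw [pvLoopI]
    simp only [hi, dif_pos]
    have hdrop : numbers.drop i = numbers[i] :: numbers.drop (i + 1) :=
      (List.getElem_cons_drop hi).symm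
    rw [pvLoopJ_eq numbers i (i + 1) hi, hdrop, pvFirst]
    by_cases hmem : (2020 - numbers[i]) ∈ numbers.drop (i + 1)
    · simp [hmem]
    · simp only [hmem, if_false]
      exact pvLoopI_eq numbers (i + 1)
  · have : numbers.drop i = [] := List.drop_eq_nil_of_le (by omega)
    rw [pvLoopI]
    simp [hi, this, pvFirst]
termination_by numbers.length - i

theorem pvScan_eq (xs : List Int) (d : PySem.Dict Int Int)
    (hd : ∀ v, d.getD v 0 = (xs.count v : Int)) :
    pvScan d xs = pvFirst xs := by
  induction xs generalizing d with
  | nil => rfl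
  | cons x xs ih =>
    rw [pvScan, pvFirst]
    have hd' : ∀ v, (d.insert x (d.getD x 0 - 1)).getD v 0 = (xs.count v : Int) := by
      intro v
      by_cases hv : v = x
      · subst hv
        rw [PySem.Dict.getD_insert, if_pos rfl, hd v]
        simp only [List.count_cons, BEq.rfl, if_true]
        push_cast
        ring
      · have hv' : x ≠ v := fun h => hv h.symm
        rw [PySem.Dict.getD_insert, if_neg hv, hd v]
        simp [hv']
    have hcond : ((d.insert x (d.getD x 0 - 1)).getD (2020 - x) 0 > 0) ↔ (2020 - x) ∈ xs := by
      rw [hd' (2020 - x)]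
      constructor
      · intro h
        have : 0 < xs.count (2020 - x) := by exact_mod_cast h
        exact List.count_pos_iff.mp this
      · intro h
        have : 0 < xs.count (2020 - x) := List.count_pos_iff.mpr h
        exact_mod_cast this
    by_cases hmem : (2020 - x) ∈ xs
    · simp only [hmem, if_true]
      rw [if_pos (hcond.mpr hmem)]
    · simp only [hmem, if_false]
      rw [if_neg (fun h => hmem (hcond.mp h))]
      exact ih _ hd'

theorem alt_eq (numbers : List Int) : getReportNumber_alt numbers = pvFirst numbers := by
  unfold getReportNumber_alt
  exact pvScan_eq numbers _ (fun v => by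
    rw [PySem.Dict.getD_foldl_insert_add_one]
    simp [PySem.Dict.getD_empty])

-- ===== VERDICT (by name: the statement is the Claim_ definition above) =====
theorem getReportNumber_spec : Claim_equal_getReportNumber := by
  intro numbers _
  unfold Spec_getReportNumber getReportNumber
  rw [pvLoopI_eq numbers 0, alt_eq, List.drop_zero]
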